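-- pv_equiv track=rewrite | github.com/Est-oup/HOLOGREEN | Virus/tree_analysis/export_taxonomy.py | generate_contig_table_and_log
-- ===== SOURCE A (Python) =====
-- def generate_contig_table_and_log(all_contigs, group_files):
--     contig_data = {contig: {} for contig in all_contigs}
--     taxo_column = {}
--     log_entries = []
--
--     for contig in all_contigs:
--         taxo_value = "unmatch"  # Default value if no match is found
--         taxonomies_found = {}  # Track which taxonomies are found in which files
--
--         for group_name, contig_groups in group_files.items():
--             if contig in contig_groups:
--                 contig_data[contig][group_name] = contig_groups[contig]
--
--                 if contig_groups[contig] != "Unknown" and contig_groups[contig] != "unmatch":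
--                     if contig_groups[contig] not in taxonomies_found:
--                         taxonomies_found[contig_groups[contig]] = []
--                     taxonomies_found[contig_groups[contig]].append(group_name)
--
--                 if contig_groups[contig] != "Unknown" and contig_groups[contig] != "unmatch":
--                     taxo_value = contig_groups[contig]
--             else:
--                 contig_data[contig][group_name] = "unmatch"
--
--         if len(taxonomies_found) > 1:
--             log_entries.append({
--                 "Contig": contig,
--                 "Taxonomies": ", ".join(f"{taxo} (in {', '.join(files)})" for taxo, files in taxonomies_found.items())
--             })
--
--         if taxo_value == "unmatch":
--             for group_name in contig_data[contig]:
--                 if contig_data[contig][group_name] == "Unknown":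
--                     taxo_value = "Unknown"
--                     break
--
--         taxo_column[contig] = taxo_value
--
--     for contig in contig_data:
--         contig_data[contig]["TAXO"] = taxo_column[contig]
--
--     return contig_data, log_entries
-- ===== SOURCE B (Python) =====
-- def generate_contig_table_and_log(all_contigs, group_files):
--     # pass 1 (group-major): transpose the input into per-contig (group, value) column lists
--     columns = {c: [] for c in all_contigs}
--     for group_name, contig_groups in group_files.items():
--         for c in columns:
--             columns[c].append((group_name, contig_groups.get(c, "unmatch")))
--     # pass 2 (contig-major): derive row, conflict log and final taxonomy from each column list
--     contig_data = {}
--     log_entries = []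
--     for c in all_contigs:
--         pairs = columns[c]
--         found = {}
--         for g, v in pairs:
--             if v != "Unknown" and v != "unmatch":
--                 found.setdefault(v, []).append(g)
--         if len(found) > 1:
--             log_entries.append({
--                 "Contig": c,
--                 "Taxonomies": ", ".join(f"{t} (in {', '.join(fs)})" for t, fs in found.items()),
--             })
--         taxo = next((v for _, v in reversed(pairs) if v != "Unknown" and v != "unmatch"), None)
--         if taxo is None:
--             taxo = "Unknown" if any(v == "Unknown" for _, v in pairs) else "unmatch"
--         row = dict(pairs)
--         row["TAXO"] = taxo
--         contig_data[c] = row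
--     return contig_data, log_entries
-- ===== Notes on version B (the rewrite author's own statement) =====
-- stated objective: alternative
-- what changed: B transposes the traversal: a first group-major pass builds each contig's (group, value) column list, and a second contig-major pass derives the row, the conflict log and the final taxonomy (found by a back-to-front search of the column list instead of A's forward overwrite), replacing A's single interleaved per-contig loop with lookups, its taxo_column dict and its final TAXO-attachment pass.
import Mathlib
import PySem

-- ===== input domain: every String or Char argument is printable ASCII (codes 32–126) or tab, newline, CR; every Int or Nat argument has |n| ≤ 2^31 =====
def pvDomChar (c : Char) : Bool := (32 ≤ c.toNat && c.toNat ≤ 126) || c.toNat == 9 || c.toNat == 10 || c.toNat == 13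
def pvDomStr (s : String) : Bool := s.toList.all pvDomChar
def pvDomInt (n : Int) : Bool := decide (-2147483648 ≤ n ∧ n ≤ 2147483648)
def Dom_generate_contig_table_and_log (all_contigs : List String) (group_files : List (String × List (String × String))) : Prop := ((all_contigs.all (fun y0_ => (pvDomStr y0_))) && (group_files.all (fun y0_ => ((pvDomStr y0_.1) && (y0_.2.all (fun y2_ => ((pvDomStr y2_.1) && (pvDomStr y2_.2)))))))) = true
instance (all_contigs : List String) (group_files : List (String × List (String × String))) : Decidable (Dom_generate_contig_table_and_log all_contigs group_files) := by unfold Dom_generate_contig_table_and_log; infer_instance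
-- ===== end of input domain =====

-- B transposes the traversal: a group-major pass builds each contig's (group, value) column list,
-- then a contig-major pass derives row, conflict log and taxonomy (back-to-front search) from it
-- (objective: alternative decomposition). Equivalence is on return values; A mutates no argument.

-- ===== PORT A =====
-- shared rendering of the "Taxonomies" string (identical expression in both Pythons)
def pvJoinTaxos (items : List (String × List String)) : String :=
  PySem.Str.join ", " (items.map (fun p => p.1 ++ " (in " ++ PySem.Str.join ", " p.2 ++ ")"))

-- one iteration of A's inner `for group_name, contig_groups in group_files.items()` loop;
-- state = (contig_data[contig] row, taxonomies_found, taxo_value)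
def pvStepA (contig : String)
    (acc : PySem.Dict String String × PySem.Dict String (List String) × String)
    (gf : String × List (String × String)) :
    PySem.Dict String String × PySem.Dict String (List String) × String :=
  match (PySem.Dict.mk gf.2).get? contig with
  | some v =>
      (acc.1.insert gf.1 v,
       (if v = "Unknown" ∨ v = "unmatch" then acc.2.1
        else ((if acc.2.1.contains v then acc.2.1 else acc.2.1.insert v []).modify v []
                (fun l => l ++ [gf.1]))),
       (if v = "Unknown" ∨ v = "unmatch" then acc.2.2 else v))
  | none => (acc.1.insert gf.1 "unmatch", acc.2.1, acc.2.2)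

def generate_contig_table_and_log (all_contigs : List String) (group_files : List (String × List (String × String))) : (List (String × List (String × String))) × (List (List (String × String))) :=
  -- contig_data = {contig: {} for contig in all_contigs}
  let contig_data : PySem.Dict String (PySem.Dict String String) :=
    all_contigs.foldl (fun d c => d.insert c (PySem.Dict.mk [])) (PySem.Dict.mk [])
  -- main loop; state = (contig_data, taxo_column, log_entries)
  let st :=
    all_contigs.foldl
      (fun (st : PySem.Dict String (PySem.Dict String String) × PySem.Dict String String × List (List (String × String))) contig =>
        let inner := group_files.foldl (pvStepA contig)
          (st.1.getD contig (PySem.Dict.mk []), PySem.Dict.mk [], "unmatch")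
        let row := inner.1
        let tf := inner.2.1
        let tv := inner.2.2
        let logs := if tf.size > 1 then
            st.2.2 ++ [[("Contig", contig), ("Taxonomies", pvJoinTaxos tf.items)]]
          else st.2.2
        -- fallback scan of contig_data[contig] for an "Unknown"
        let tv := if tv = "unmatch" ∧ row.values.any (· == "Unknown") then "Unknown" else tv
        (st.1.insert contig row, st.2.1.insert contig tv, logs))
      (contig_data, (PySem.Dict.mk [] : PySem.Dict String String), ([] : List (List (String × String))))
  -- for contig in contig_data: contig_data[contig]["TAXO"] = taxo_column[contig]
  (st.1.items.map (fun p => (p.1, (p.2.insert "TAXO" (st.2.1.getD p.1 "")).items)), st.2.2)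

-- ===== PORT B =====
def generate_contig_table_and_log_alt (all_contigs : List String) (group_files : List (String × List (String × String))) : (List (String × List (String × String))) × (List (List (String × String))) :=
  -- pass 1 (group-major): columns = {c: [] for c in all_contigs}; append (group, value) per group
  let columns0 : PySem.Dict String (List (String × String)) :=
    all_contigs.foldl (fun d c => d.insert c []) (PySem.Dict.mk [])
  let columns := group_files.foldl
    (fun cols gf =>
      cols.keys.foldl
        (fun cols2 c =>
          cols2.modify c [] (fun l => l ++ [(gf.1, ((PySem.Dict.mk gf.2).get? c).getD "unmatch")]))
        cols)
    columns0
  -- pass 2 (contig-major): derive row, conflict log and taxonomy from each column list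
  let st :=
    all_contigs.foldl
      (fun (st : PySem.Dict String (PySem.Dict String String) × List (List (String × String))) c =>
        let pairs := columns.getD c []
        let found := pairs.foldl
          (fun f p =>
            if !(p.2 == "Unknown" || p.2 == "unmatch") then
              (f.setdefault p.2 []).modify p.2 [] (fun l => l ++ [p.1])
            else f)
          (PySem.Dict.mk [])
        let logs := if found.size > 1 then
            st.2 ++ [[("Contig", c), ("Taxonomies", pvJoinTaxos found.items)]]
          else st.2
        let taxo := match pairs.reverse.find? (fun p => !(p.2 == "Unknown" || p.2 == "unmatch")) with
          | some p => p.2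
          | none => if pairs.any (fun p => p.2 == "Unknown") then "Unknown" else "unmatch"
        let row := (PySem.Dict.ofList pairs).insert "TAXO" taxo
        (st.1.insert c row, logs))
      ((PySem.Dict.mk [] : PySem.Dict String (PySem.Dict String String)), ([] : List (List (String × String))))
  (st.1.items.map (fun p => (p.1, p.2.items)), st.2)

-- ===== PRECONDITION & SPEC =====
-- Pre_ excludes only association lists with a repeated group name: group_files is a dict in the
-- Python function, and a duplicate-key association list represents no Python dict argument at all.
def Pre_generate_contig_table_and_log (all_contigs : List String) (group_files : List (String × List (String × String))) : Prop :=
  (group_files.map Prod.fst).Nodup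
instance (all_contigs : List String) (group_files : List (String × List (String × String))) : Decidable (Pre_generate_contig_table_and_log all_contigs group_files) := by unfold Pre_generate_contig_table_and_log; infer_instance

def pvWitness_generate_contig_table_and_log : List String × (List (String × List (String × String))) :=
  (["c1", "c2"], [("g1", [("c1", "taxA")]), ("g2", [("c1", "Unknown"), ("c2", "taxB")])])

def Spec_generate_contig_table_and_log (all_contigs : List String) (group_files : List (String × List (String × String))) (out : (List (String × List (String × String))) × (List (List (String × String)))) : Prop := out = generate_contig_table_and_log_alt all_contigs group_files
instance (all_contigs : List String) (group_files : List (String × List (String × String))) (out : (List (String × List (String × String))) × (List (List (String × String)))) : Decidable (Spec_generate_contig_table_and_log all_contigs group_files out) := by unfold Spec_generate_contig_table_and_log; infer_instance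

-- ===== CLAIM (what is proved, stated in full; the proofs are below) =====
def Claim_equal_generate_contig_table_and_log : Prop := ∀ (all_contigs : List String) (group_files : List (String × List (String × String))), Dom_generate_contig_table_and_log all_contigs group_files → Pre_generate_contig_table_and_log all_contigs group_files → Spec_generate_contig_table_and_log all_contigs group_files (generate_contig_table_and_log all_contigs group_files)

-- ===== LEMMAS AND PROOFS =====

-- per-contig data in closed form
def pvPairs (gs : List (String × List (String × String))) (c : String) : List (String × String) :=
  gs.map (fun gf => (gf.1, ((PySem.Dict.mk gf.2).get? c).getD "unmatch"))

def pvGood (gs : List (String × List (String × String))) (c : String) : List (String × String) :=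
  (pvPairs gs c).filter (fun p => !(p.2 == "Unknown" || p.2 == "unmatch"))

def pvRow (gs : List (String × List (String × String))) (c : String) : PySem.Dict String String :=
  PySem.Dict.ofList (pvPairs gs c)

def pvTF (gs : List (String × List (String × String))) (c : String) : PySem.Dict String (List String) :=
  (pvGood gs c).foldl (fun f p => (f.setdefault p.2 []).modify p.2 [] (fun l => l ++ [p.1])) (PySem.Dict.mk [])

def pvTaxo (gs : List (String × List (String × String))) (c : String) : String :=
  match (pvGood gs c).getLast? with
  | some p => p.2
  | none => if (pvPairs gs c).any (fun p => p.2 == "Unknown") then "Unknown" else "unmatch"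

def pvEntry (gs : List (String × List (String × String))) (c : String) : List (List (String × String)) :=
  if (pvTF gs c).size > 1 then [[("Contig", c), ("Taxonomies", pvJoinTaxos (pvTF gs c).items)]] else []

def pvRowFull (gs : List (String × List (String × String))) (c : String) : PySem.Dict String String :=
  (pvRow gs c).insert "TAXO" (pvTaxo gs c)

-- workhorse: items of a fold of keyed inserts over a dict in "map over distinct keys" form
theorem pv_foldl_insert_items {β : Type} (f : String → β) :
    ∀ (cs : List String) (g : String → β) (s : List String), s.Nodup →
    ((cs.foldl (fun d c => d.insert c (f c)) (PySem.Dict.mk (s.map (fun c => (c, g c)))))).items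
      = s.map (fun c => (c, if c ∈ cs then f c else g c))
        ++ ((PySem.Set.ofList cs).filter (fun c => !(s.contains c))).map (fun c => (c, f c)) := by
  intro cs
  induction cs with
  | nil =>
    intro g s _
    simp [PySem.Set.ofList]
  | cons c cs' ih =>
    intro g s hnd
    have hofl : PySem.Set.ofList (c :: cs') = [c] ++ (PySem.Set.ofList cs').filter (fun y => !(y == c)) := by
      have h1 : PySem.Set.ofList (c :: cs') = PySem.Set.update [c] cs' := by
        show List.foldl PySem.Set.add [] (c :: cs') = _
        rw [List.foldl_cons]
        have : PySem.Set.add ([] : List String) c = [c] := by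
          simp [PySem.Set.add, PySem.Set.contains]
        rw [this]; rfl
      rw [h1, PySem.Set.update_eq_append_filter]
      congr 1
      apply List.filter_congr
      intro y _
      rw [Bool.eq_iff_iff]
      simp [PySem.Set.contains]
    by_cases hc : c ∈ s
    · -- key already present: overwrite in place
      have hcont : (PySem.Dict.mk (s.map (fun x => (x, g x)))).contains c = true := by
        rw [PySem.Dict.contains_iff_mem_keys, PySem.Dict.keys_mk, List.map_map]
        simpa using hc
      have hins : (PySem.Dict.mk (s.map (fun x => (x, g x)))).insert c (f c)
          = PySem.Dict.mk (s.map (fun x => (x, if x = c then f c else g x))) := by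
        apply PySem.Dict.ext
        rw [PySem.Dict.items_insert_of_contains _ (f c) hcont]
        show _ = (PySem.Dict.mk _).items
        rw [List.map_map]
        apply List.map_congr_left
        intro x _
        by_cases hx : x = c <;> simp [hx]
      rw [List.foldl_cons, hins, ih (fun x => if x = c then f c else g x) s hnd]
      congr 1
      · apply List.map_congr_left
        intro x hx
        by_cases h1 : x ∈ cs'
        · simp [h1]
        · by_cases h2 : x = c <;> simp [h1, h2]
      · rw [hofl, List.filter_append]
        have h2 : List.filter (fun x => !(s.contains x)) [c] = [] := by
          simp [List.filter, hc]
        rw [h2, List.nil_append, List.filter_filter]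
        congr 1
        apply List.filter_congr
        intro y _
        rw [Bool.eq_iff_iff]
        simp [List.elem_iff]
        intro hy hyc
        exact hy (hyc ▸ hc)
    · -- fresh key: appended at the end
      have hcont : (PySem.Dict.mk (s.map (fun x => (x, g x)))).contains c = false := by
        rw [← Bool.not_eq_true, PySem.Dict.contains_iff_mem_keys, PySem.Dict.keys_mk, List.map_map]
        simpa using hc
      have hins : (PySem.Dict.mk (s.map (fun x => (x, g x)))).insert c (f c)
          = PySem.Dict.mk ((s ++ [c]).map (fun x => (x, if x = c then f c else g x))) := by
        apply PySem.Dict.ext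
        rw [PySem.Dict.items_insert_of_not_contains _ (f c) hcont]
        show _ = (PySem.Dict.mk _).items
        rw [List.map_append]
        congr 1
        · apply List.map_congr_left
          intro x hx
          have : x ≠ c := fun h => hc (h ▸ hx)
          simp [this]
        · simp
      have hnd' : (s ++ [c]).Nodup := by
        rw [List.nodup_append]
        refine ⟨hnd, List.nodup_singleton c, ?_⟩
        intro a ha b hb
        simp only [List.mem_singleton] at hb
        subst hb
        exact fun h => hc (h ▸ ha)
      rw [List.foldl_cons, hins, ih (fun x => if x = c then f c else g x) (s ++ [c]) hnd']
      rw [List.map_append, List.append_assoc]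
      congr 1
      · apply List.map_congr_left
        intro x hx
        have hxc : x ≠ c := fun h => hc (h ▸ hx)
        by_cases h1 : x ∈ cs' <;> simp [h1, hxc]
      · have h2 : List.filter (fun x => !(s.contains x)) [c] = [c] := by
          simp [List.filter, hc]
        have h4 : List.map (fun x => (x, if x ∈ cs' then f x else if x = c then f c else g x)) [c]
            = [(c, f c)] := by
          by_cases hmc : c ∈ cs' <;> simp [hmc]
        have hfil : List.filter (fun x => !((s ++ [c]).contains x)) (PySem.Set.ofList cs')
            = List.filter (fun a => !(s.contains a) && !(a == c)) (PySem.Set.ofList cs') := by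
          apply List.filter_congr
          intro y _
          rw [Bool.eq_iff_iff]
          simp [List.elem_iff]
        rw [hofl, List.filter_append, h2, List.filter_filter, h4, hfil]
        simp

theorem pv_foldl_insert_items_nil {β : Type} (f : String → β) (cs : List String) :
    ((cs.foldl (fun d c => d.insert c (f c)) (PySem.Dict.mk ([] : List (String × β))))).items
      = (PySem.Set.ofList cs).map (fun c => (c, f c)) := by
  have := pv_foldl_insert_items f cs f [] List.nodup_nil
  simpa using this

theorem pv_items_pvRow (gs : List (String × List (String × String))) (c : String)
    (h : (gs.map Prod.fst).Nodup) : (pvRow gs c).items = pvPairs gs c := by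
  unfold pvRow PySem.Dict.ofList PySem.Dict.update
  have := PySem.Dict.items_foldl_insert_fresh (pvPairs gs c) Prod.fst Prod.snd (PySem.Dict.mk [])
    (by intro a _; simp [PySem.Dict.contains])
    (by
      have heq : (pvPairs gs c).map Prod.fst = gs.map Prod.fst := by
        simp [pvPairs, List.map_map]
      rw [heq]; exact h)
  simpa using this

theorem pv_foldl_insert_self (ps : List (String × String)) :
    ∀ (d : PySem.Dict String String), (∀ p ∈ ps, p ∈ d.items) → d.keys.Nodup →
    ps.foldl (fun r p => r.insert p.1 p.2) d = d := by
  induction ps with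
  | nil => intro d _ _; rfl
  | cons p t ih =>
    intro d hmem hnd
    have hd : d.insert p.1 p.2 = d := by
      have hc : d.contains p.1 = true := by
        rw [PySem.Dict.contains_iff_mem_keys]
        exact List.mem_map_of_mem (hmem p (by simp))
      apply PySem.Dict.ext
      rw [PySem.Dict.items_insert_of_contains d p.2 hc]
      have : ∀ q ∈ d.items, (if (q.1 == p.1) = true then (p.1, p.2) else q) = q := by
        intro q hq
        by_cases hqe : q.1 = p.1
        · have : q = p := by
            have hp1 : p ∈ d.items := hmem p (by simp)
            have hk : (d.items.map (fun x => x.1)).Nodup := hnd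
            exact List.inj_on_of_nodup_map hk hq hp1 hqe
          simp [this]
        · simp [hqe]
      rw [List.map_congr_left this]; simp
    rw [List.foldl_cons, hd]
    exact ih d (fun q hq => hmem q (by simp [hq])) hnd

theorem pv_innerA (gs : List (String × List (String × String))) (c : String) :
    ∀ (r0 : PySem.Dict String String) (tf0 : PySem.Dict String (List String)) (tv0 : String),
    gs.foldl (pvStepA c) (r0, tf0, tv0)
      = ((pvPairs gs c).foldl (fun r p => r.insert p.1 p.2) r0,
         (pvGood gs c).foldl (fun f p =>
            (if f.contains p.2 then f else f.insert p.2 []).modify p.2 [] (fun l => l ++ [p.1])) tf0,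
         ((pvGood gs c).getLast?).elim tv0 Prod.snd) := by
  induction gs with
  | nil => intro r0 tf0 tv0; simp [pvPairs, pvGood]
  | cons gf t ih =>
    intro r0 tf0 tv0
    have hp : pvPairs (gf :: t) c = (gf.1, ((PySem.Dict.mk gf.2).get? c).getD "unmatch") :: pvPairs t c := rfl
    cases hv : (PySem.Dict.mk gf.2).get? c with
    | none =>
      have hg : pvGood (gf :: t) c = pvGood t c := by
        simp [pvGood, hp, hv, List.filter_cons]
      simp only [List.foldl_cons, pvStepA, hv, hp, hg, ih, Option.getD_none]
    | some v =>
      by_cases hbad : v = "Unknown" ∨ v = "unmatch"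
      · have hg : pvGood (gf :: t) c = pvGood t c := by
          simp [pvGood, hp, hv, List.filter_cons]
          rcases hbad with h | h <;> simp [h]
        simp only [List.foldl_cons, pvStepA, hv, hp, hg, if_pos hbad, ih, Option.getD_some]
      · have hg : pvGood (gf :: t) c = (gf.1, v) :: pvGood t c := by
          push_neg at hbad
          simp [pvGood, hp, hv, List.filter_cons, hbad.1, hbad.2]
        simp only [List.foldl_cons, pvStepA, hv, hp, hg, if_neg hbad, ih, Option.getD_some,
          List.getLast?_cons]
        have : ∀ o : Option (String × String), o.elim v Prod.snd = (some (o.getD (gf.1, v))).elim tv0 Prod.snd := by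
          intro o; cases o <;> simp
        rw [this]

theorem pv_tf_eq (gs : List (String × List (String × String))) (c : String) :
    (pvGood gs c).foldl (fun f p =>
        (if f.contains p.2 then f else f.insert p.2 []).modify p.2 [] (fun l => l ++ [p.1]))
      (PySem.Dict.mk []) = pvTF gs c := by
  unfold pvTF
  congr 1
  funext f p
  by_cases h : f.contains p.2 <;>
    simp [h, PySem.Dict.setdefault, PySem.Dict.insert]

theorem pv_taxo_eq (gs : List (String × List (String × String))) (c : String)
    (h : (gs.map Prod.fst).Nodup) :
    (if ((pvGood gs c).getLast?).elim "unmatch" Prod.snd = "unmatch"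
        ∧ (pvRow gs c).values.any (· == "Unknown")
     then "Unknown" else ((pvGood gs c).getLast?).elim "unmatch" Prod.snd) = pvTaxo gs c := by
  have hv : (pvRow gs c).values.any (· == "Unknown")
      = (pvPairs gs c).any (fun p => p.2 == "Unknown") := by
    rw [PySem.Dict.values, pv_items_pvRow gs c h, List.any_map]
    rfl
  cases hg : (pvGood gs c).getLast? with
  | none =>
    simp only [hg, Option.elim_none, pvTaxo, hg, hv]
    by_cases ha : (pvPairs gs c).any (fun p => p.2 == "Unknown") <;> simp [ha]
  | some p =>
    have hmem : p ∈ pvGood gs c := by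
      cases hG : pvGood gs c with
      | nil => rw [hG] at hg; simp at hg
      | cons q t =>
        rw [hG] at hg
        have : p = (q :: t).getLast (by simp) := by
          rw [List.getLast?_eq_some_getLast (l := q :: t) (by simp)] at hg
          exact (Option.some.injEq _ _ ▸ hg.symm)
        rw [this]; exact List.getLast_mem _
    have hpred : (!(p.2 == "Unknown" || p.2 == "unmatch")) = true := by
      have := List.mem_filter.mp hmem
      exact this.2
    have hne : p.2 ≠ "unmatch" := by
      simp only [Bool.not_eq_eq_eq_not, Bool.not_true, Bool.or_eq_false_iff, beq_eq_false_iff_ne] at hpred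
      exact hpred.2
    simp only [hg, Option.elim_some, pvTaxo]
    rw [if_neg]
    intro hcon
    exact hne hcon.1

-- default lookups in A's pre-initialised contig_data are all the empty row
theorem pv_init_getD {β : Type} (e : β) :
    ∀ (cs : List String) (d : PySem.Dict String β),
    (∀ c, d.getD c e = e) →
    ∀ c, (cs.foldl (fun d c => d.insert c e) d).getD c e = e := by
  intro cs
  induction cs with
  | nil => intro d h c; exact h c
  | cons x t ih =>
    intro d h c
    rw [List.foldl_cons]
    apply ih
    intro c'
    rw [PySem.Dict.getD_insert]
    by_cases hx : c' = x <;> simp [hx, h]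

-- A's main loop in closed form
theorem pv_outerA (gs : List (String × List (String × String)))
    (hnd : (gs.map Prod.fst).Nodup) :
    ∀ (cs : List String) (cd : PySem.Dict String (PySem.Dict String String))
      (tc : PySem.Dict String String) (logs : List (List (String × String))),
    (∀ c, cd.getD c (PySem.Dict.mk []) = PySem.Dict.mk []
        ∨ cd.getD c (PySem.Dict.mk []) = pvRow gs c) →
    cs.foldl
      (fun (st : PySem.Dict String (PySem.Dict String String) × PySem.Dict String String × List (List (String × String))) contig =>
        let inner := gs.foldl (pvStepA contig)
          (st.1.getD contig (PySem.Dict.mk []), PySem.Dict.mk [], "unmatch")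
        let row := inner.1
        let tf := inner.2.1
        let tv := inner.2.2
        let logs := if tf.size > 1 then
            st.2.2 ++ [[("Contig", contig), ("Taxonomies", pvJoinTaxos tf.items)]]
          else st.2.2
        let tv := if tv = "unmatch" ∧ row.values.any (· == "Unknown") then "Unknown" else tv
        (st.1.insert contig row, st.2.1.insert contig tv, logs))
      (cd, tc, logs)
      = (cs.foldl (fun d c => d.insert c (pvRow gs c)) cd,
         cs.foldl (fun t c => t.insert c (pvTaxo gs c)) tc,
         logs ++ cs.flatMap (pvEntry gs)) := by
  intro cs
  induction cs with
  | nil => intro cd tc logs _; simp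
  | cons c t ih =>
    intro cd tc logs hcd
    have hrow : (gs.foldl (pvStepA c)
        (cd.getD c (PySem.Dict.mk []), PySem.Dict.mk [], "unmatch")).1 = pvRow gs c := by
      rw [pv_innerA]
      rcases hcd c with h | h
      · rw [h]; rfl
      · rw [h]
        apply pv_foldl_insert_self
        · intro p hp
          rw [pv_items_pvRow gs c hnd]; exact hp
        · show ((pvRow gs c).items.map (fun x => x.1)).Nodup
          rw [pv_items_pvRow gs c hnd]
          have heq : (pvPairs gs c).map (fun x => x.1) = gs.map Prod.fst := by
            simp [pvPairs, List.map_map]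
          rw [heq]; exact hnd
    have htf : (gs.foldl (pvStepA c)
        (cd.getD c (PySem.Dict.mk []), PySem.Dict.mk [], "unmatch")).2.1 = pvTF gs c := by
      rw [pv_innerA]
      exact pv_tf_eq gs c
    have htv : (gs.foldl (pvStepA c)
        (cd.getD c (PySem.Dict.mk []), PySem.Dict.mk [], "unmatch")).2.2
        = ((pvGood gs c).getLast?).elim "unmatch" Prod.snd := by
      rw [pv_innerA]
    have hcd' : ∀ c', (cd.insert c (pvRow gs c)).getD c' (PySem.Dict.mk []) = PySem.Dict.mk []
        ∨ (cd.insert c (pvRow gs c)).getD c' (PySem.Dict.mk []) = pvRow gs c' := by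
      intro c'
      rw [PySem.Dict.getD_insert]
      by_cases hx : c' = c
      · subst hx; right; simp
      · simp only [if_neg hx]; exact hcd c'
    rw [List.foldl_cons]
    dsimp only
    simp only [hrow, htf, htv]
    rw [pv_taxo_eq gs c hnd]
    by_cases h : (pvTF gs c).size > 1
    · rw [if_pos h, ih _ _ _ hcd']
      simp [pvEntry, h, List.flatMap_cons, List.append_assoc]
    · rw [if_neg h, ih _ _ _ hcd']
      simp [pvEntry, h, List.flatMap_cons]

-- find? from the back = getLast? of the filtered list
theorem pv_find?_reverse {α : Type} (p : α → Bool) (l : List α) :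
    l.reverse.find? p = (l.filter p).getLast? := by
  induction l with
  | nil => rfl
  | cons a t ih =>
    rw [List.reverse_cons, List.find?_append, ih, List.filter_cons]
    by_cases h : p a
    · simp only [if_pos h]
      cases hg : (t.filter p).getLast? with
      | none =>
        have : t.filter p = [] := by
          cases hF : t.filter p with
          | nil => rfl
          | cons q r => rw [hF] at hg; simp [List.getLast?_concat] at hg
        simp [this, List.find?, h]
      | some q => simp [List.getLast?_cons, hg]
    · simp only [Bool.not_eq_true] at h
      simp [h]

-- B's per-contig conflict dict equals pvTF (fold with an if-guard = fold over the filtered list)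
theorem pv_found_eq (gs : List (String × List (String × String))) (c : String) :
    (pvPairs gs c).foldl
      (fun f p =>
        if !(p.2 == "Unknown" || p.2 == "unmatch") then
          (f.setdefault p.2 []).modify p.2 [] (fun l => l ++ [p.1])
        else f)
      (PySem.Dict.mk []) = pvTF gs c := by
  rw [PySem.List.foldl_if_eq_foldl_filter]
  rfl

-- B's back-to-front taxonomy search equals pvTaxo
theorem pv_taxoB_eq (gs : List (String × List (String × String))) (c : String) :
    (match (pvPairs gs c).reverse.find? (fun p => !(p.2 == "Unknown" || p.2 == "unmatch")) with
      | some p => p.2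
      | none => if (pvPairs gs c).any (fun p => p.2 == "Unknown") then "Unknown" else "unmatch")
    = pvTaxo gs c := by
  rw [pv_find?_reverse]
  rfl

-- the transposed column dict: getD after the group-major pass appends pvPairs
theorem pv_filter_map_self (s : List String) (c : String) (pr : String → String × String)
    (hnd : s.Nodup) (hc : c ∈ s) :
    (s.map (fun x => (x, pr x))).filter (fun p => p.1 == c) = [(c, pr c)] := by
  induction s with
  | nil => cases hc
  | cons a t ih =>
    rw [List.map_cons, List.filter_cons]
    by_cases ha : a = c
    · subst ha
      have hnc : a ∉ t := (List.nodup_cons.mp hnd).1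
      have : (t.map (fun x => (x, pr x))).filter (fun p => p.1 == a) = [] := by
        rw [List.filter_eq_nil_iff]
        intro p hp
        obtain ⟨x, hx, hxe⟩ := List.mem_map.mp hp
        subst hxe
        intro h
        exact hnc ((beq_iff_eq.mp h) ▸ hx)
      simp [this]
    · have hct : c ∈ t := by
        rcases List.mem_cons.mp hc with h | h
        · exact absurd h.symm ha
        · exact h
      have := ih (List.nodup_cons.mp hnd).2 hct
      simp [ha, this]

theorem pv_cols_getD (gs : List (String × List (String × String))) :
    ∀ (cols : PySem.Dict String (List (String × String))) (c : String),
    cols.keys.Nodup → c ∈ cols.keys →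
    (gs.foldl
      (fun cols gf =>
        cols.keys.foldl
          (fun cols2 c2 =>
            cols2.modify c2 [] (fun l => l ++ [(gf.1, ((PySem.Dict.mk gf.2).get? c2).getD "unmatch")]))
          cols)
      cols).getD c []
      = cols.getD c [] ++ pvPairs gs c := by
  induction gs with
  | nil => intro cols c _ _; simp [pvPairs]
  | cons gf t ih =>
    intro cols c hnd hc
    rw [List.foldl_cons]
    have hfold : cols.keys.foldl
        (fun cols2 c2 =>
          cols2.modify c2 [] (fun l => l ++ [(gf.1, ((PySem.Dict.mk gf.2).get? c2).getD "unmatch")]))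
        cols
      = (cols.keys.map (fun c2 => (c2, (gf.1, ((PySem.Dict.mk gf.2).get? c2).getD "unmatch")))).foldl
          (fun cols2 p => cols2.modify p.1 [] (fun l => l ++ [p.2])) cols := by
      rw [List.foldl_map]
    have hkeys : (cols.keys.foldl
        (fun cols2 c2 =>
          cols2.modify c2 [] (fun l => l ++ [(gf.1, ((PySem.Dict.mk gf.2).get? c2).getD "unmatch")]))
        cols).keys = cols.keys := by
      rw [PySem.Dict.keys_foldl_modify, PySem.Set.update_eq_append_filter]
      have : (PySem.Set.ofList cols.keys).filter (fun x => !(PySem.Set.contains cols.keys x)) = [] := by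
        rw [List.filter_eq_nil_iff]
        intro a ha
        simp [PySem.Set.contains, List.elem_iff, (PySem.Set.mem_ofList _ a).mp ha]
      rw [this, List.append_nil]
    have hgetD : (cols.keys.foldl
        (fun cols2 c2 =>
          cols2.modify c2 [] (fun l => l ++ [(gf.1, ((PySem.Dict.mk gf.2).get? c2).getD "unmatch")]))
        cols).getD c []
        = cols.getD c [] ++ [(gf.1, ((PySem.Dict.mk gf.2).get? c).getD "unmatch")] := by
      rw [hfold, PySem.Dict.getD_foldl_modify_append, pv_filter_map_self cols.keys c _ hnd hc]
      simp
    rw [ih _ c (by rw [hkeys]; exact hnd) (by rw [hkeys]; exact hc), hgetD]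
    have hp : pvPairs (gf :: t) c = (gf.1, ((PySem.Dict.mk gf.2).get? c).getD "unmatch") :: pvPairs t c := rfl
    rw [hp, List.append_assoc]
    rfl

-- B's contig-major pass in closed form, given the column lookups
theorem pv_outerB (gs : List (String × List (String × String)))
    (cols : PySem.Dict String (List (String × String))) :
    ∀ (cs : List String) (cd : PySem.Dict String (PySem.Dict String String))
      (logs : List (List (String × String))),
    (∀ c ∈ cs, cols.getD c [] = pvPairs gs c) →
    cs.foldl
      (fun (st : PySem.Dict String (PySem.Dict String String) × List (List (String × String))) c =>
        let pairs := cols.getD c []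
        let found := pairs.foldl
          (fun f p =>
            if !(p.2 == "Unknown" || p.2 == "unmatch") then
              (f.setdefault p.2 []).modify p.2 [] (fun l => l ++ [p.1])
            else f)
          (PySem.Dict.mk [])
        let logs := if found.size > 1 then
            st.2 ++ [[("Contig", c), ("Taxonomies", pvJoinTaxos found.items)]]
          else st.2
        let taxo := match pairs.reverse.find? (fun p => !(p.2 == "Unknown" || p.2 == "unmatch")) with
          | some p => p.2
          | none => if pairs.any (fun p => p.2 == "Unknown") then "Unknown" else "unmatch"
        let row := (PySem.Dict.ofList pairs).insert "TAXO" taxo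
        (st.1.insert c row, logs))
      (cd, logs)
      = (cs.foldl (fun d c => d.insert c (pvRowFull gs c)) cd,
         logs ++ cs.flatMap (pvEntry gs)) := by
  intro cs
  induction cs with
  | nil => intro cd logs _; simp
  | cons c t ih =>
    intro cd logs h
    rw [List.foldl_cons, List.foldl_cons]
    have hpc : cols.getD c [] = pvPairs gs c := h c (by simp)
    show t.foldl _
        (cd.insert c ((PySem.Dict.ofList (cols.getD c [])).insert "TAXO" _),
         if ((cols.getD c []).foldl _ (PySem.Dict.mk [])).size > 1 then _ else logs) = _
    rw [hpc]
    rw [pv_found_eq gs c]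
    have hrow : (PySem.Dict.ofList (pvPairs gs c)).insert "TAXO"
        (match (pvPairs gs c).reverse.find? (fun p => !(p.2 == "Unknown" || p.2 == "unmatch")) with
          | some p => p.2
          | none => if (pvPairs gs c).any (fun p => p.2 == "Unknown") then "Unknown" else "unmatch")
        = pvRowFull gs c := by
      rw [pv_taxoB_eq gs c]
      rfl
    rw [hrow]
    have h' : ∀ c' ∈ t, cols.getD c' [] = pvPairs gs c' := fun c' hc' => h c' (by simp [hc'])
    by_cases hsz : (pvTF gs c).size > 1
    · rw [if_pos hsz, ih _ _ h']
      simp [pvEntry, hsz, List.flatMap_cons, List.append_assoc]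
    · rw [if_neg hsz, ih _ _ h']
      simp [pvEntry, hsz, List.flatMap_cons]

-- ===== VERDICT (by name: the statement is the Claim_ definition above) =====
theorem generate_contig_table_and_log_spec : Claim_equal_generate_contig_table_and_log := by
  intro ac gs _ hpre
  have hnd : (gs.map Prod.fst).Nodup := hpre
  unfold Spec_generate_contig_table_and_log
  unfold generate_contig_table_and_log generate_contig_table_and_log_alt
  dsimp only
  -- A side
  have hinit : ∀ c, (ac.foldl (fun (d : PySem.Dict String (PySem.Dict String String)) c => d.insert c (PySem.Dict.mk [])) (PySem.Dict.mk [])).getD c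
      (PySem.Dict.mk []) = PySem.Dict.mk []
      ∨ (ac.foldl (fun (d : PySem.Dict String (PySem.Dict String String)) c => d.insert c (PySem.Dict.mk [])) (PySem.Dict.mk [])).getD c
      (PySem.Dict.mk []) = pvRow gs c := by
    intro c
    exact Or.inl (pv_init_getD (PySem.Dict.mk []) ac (PySem.Dict.mk []) (fun _ => rfl) c)
  rw [pv_outerA gs hnd ac _ _ _ hinit]
  -- B side: the column dict
  have hcols0 : (ac.foldl (fun (d : PySem.Dict String (List (String × String))) c => d.insert c []) (PySem.Dict.mk [])).items
      = (PySem.Set.ofList ac).map (fun c => (c, ([] : List (String × String)))) :=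
    pv_foldl_insert_items_nil _ ac
  have hckeys : (ac.foldl (fun (d : PySem.Dict String (List (String × String))) c => d.insert c []) (PySem.Dict.mk [])).keys
      = PySem.Set.ofList ac := by
    show ((ac.foldl (fun (d : PySem.Dict String (List (String × String))) c => d.insert c []) (PySem.Dict.mk [])).items.map (fun x => x.1)) = _
    rw [hcols0, List.map_map]
    have : ((fun (x : String × List (String × String)) => x.1) ∘ fun c => (c, ([] : List (String × String)))) = id := rfl
    rw [this, List.map_id]
  have hcolsD : ∀ c ∈ ac,
      ((gs.foldl
        (fun cols gf =>
          cols.keys.foldl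
            (fun cols2 c2 =>
              cols2.modify c2 [] (fun l => l ++ [(gf.1, ((PySem.Dict.mk gf.2).get? c2).getD "unmatch")]))
            cols)
        (ac.foldl (fun (d : PySem.Dict String (List (String × String))) c => d.insert c []) (PySem.Dict.mk [])))).getD c []
      = pvPairs gs c := by
    intro c hc
    rw [pv_cols_getD gs _ c (hckeys ▸ PySem.Set.nodup_ofList ac)
      (hckeys ▸ (PySem.Set.mem_ofList ac c).mpr hc)]
    rw [pv_init_getD ([] : List (String × String)) ac (PySem.Dict.mk []) (fun _ => rfl) c]
    rfl
  rw [pv_outerB gs _ ac _ _ hcolsD]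
  -- assemble the final items
  have h0 : ac.foldl (fun (d : PySem.Dict String (PySem.Dict String String)) c => d.insert c (PySem.Dict.mk [])) (PySem.Dict.mk [])
      = PySem.Dict.mk ((PySem.Set.ofList ac).map
          (fun c => (c, (PySem.Dict.mk [] : PySem.Dict String String)))) := by
    apply PySem.Dict.ext
    exact pv_foldl_insert_items_nil _ ac
  have hcdA : (ac.foldl (fun d c => d.insert c (pvRow gs c))
      (ac.foldl (fun (d : PySem.Dict String (PySem.Dict String String)) c => d.insert c (PySem.Dict.mk [])) (PySem.Dict.mk []))).items
      = (PySem.Set.ofList ac).map (fun c => (c, pvRow gs c)) := by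
    rw [h0, pv_foldl_insert_items (pvRow gs) ac (fun _ => PySem.Dict.mk [])
      (PySem.Set.ofList ac) (PySem.Set.nodup_ofList ac)]
    have h1 : List.filter (fun c => !(List.contains (PySem.Set.ofList ac) c)) (PySem.Set.ofList ac)
        = [] := by
      rw [List.filter_eq_nil_iff]
      intro a ha
      simp [List.elem_iff, ha]
    rw [h1, List.map_nil, List.append_nil]
    apply List.map_congr_left
    intro x hx
    rw [if_pos ((PySem.Set.mem_ofList ac x).mp hx)]
  have htc : (ac.foldl (fun t c => t.insert c (pvTaxo gs c)) (PySem.Dict.mk [])).items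
      = (PySem.Set.ofList ac).map (fun c => (c, pvTaxo gs c)) :=
    pv_foldl_insert_items_nil _ ac
  have htcD : ∀ c ∈ PySem.Set.ofList ac,
      (ac.foldl (fun t c => t.insert c (pvTaxo gs c)) (PySem.Dict.mk [])).getD c "" = pvTaxo gs c := by
    intro c hc
    apply PySem.Dict.getD_of_mem_items
    · rw [htc]
      exact List.mem_map_of_mem hc
    · show ((ac.foldl (fun t c => t.insert c (pvTaxo gs c)) (PySem.Dict.mk [])).items.map
        (fun x => x.1)).Nodup
      rw [htc, List.map_map]
      have : ((fun (x : String × String) => x.1) ∘ fun c => (c, pvTaxo gs c)) = id := rfl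
      rw [this, List.map_id]
      exact PySem.Set.nodup_ofList ac
  have hcdB : (ac.foldl (fun d c => d.insert c (pvRowFull gs c)) (PySem.Dict.mk [])).items
      = (PySem.Set.ofList ac).map (fun c => (c, pvRowFull gs c)) :=
    pv_foldl_insert_items_nil _ ac
  rw [hcdA, hcdB, List.map_map, List.map_map]
  refine Prod.ext ?_ rfl
  show (PySem.Set.ofList ac).map _ = (PySem.Set.ofList ac).map _
  apply List.map_congr_left
  intro c hc
  show (c, ((pvRow gs c).insert "TAXO"
      ((ac.foldl (fun t c => t.insert c (pvTaxo gs c)) (PySem.Dict.mk [])).getD c "")).items)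
    = (c, (pvRowFull gs c).items)
  rw [htcD c hc]
  rfl
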